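-- pv_equiv track=rewrite | github.com/TripleC121/micro-security-auditor | app/agent.py | calculate_security_score
-- ===== SOURCE A (Python) =====
-- from typing import Dict, List, Tuple
--
-- def calculate_security_score(findings: List[Dict]) -> Tuple[int, Dict[str, Dict]]:
--     """Calculate security score (0-100) based on findings.
--
--     Args:
--         findings: List of finding dictionaries with 'severity' and 'check' fields
--
--     Returns:
--         Tuple of (score, breakdown) where breakdown is:
--         {
--             'EC2': {'points': -10, 'count': 1, 'severity': 'HIGH'},
--             'S3': {'points': -5, 'count': 1, 'severity': 'MEDIUM'},
--             'IAM': {'points': -20, 'count': 1, 'severity': 'CRITICAL'}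
--         }
--     """
--     # Point deductions per severity
--     SEVERITY_POINTS = {
--         'CRITICAL': -20,
--         'HIGH': -10,
--         'MEDIUM': -5,
--         'LOW': -1
--     }
--
--     # Group findings by category
--     categories = {
--         'EC2': [],
--         'S3': [],
--         'IAM': []
--     }
--
--     for finding in findings:
--         check = finding.get('check', '')
--         if check.startswith('EC2_'):
--             categories['EC2'].append(finding)
--         elif check.startswith('S3_'):
--             categories['S3'].append(finding)
--         elif check.startswith('IAM_'):
--             categories['IAM'].append(finding)
--
--     # Calculate deductions per category
--     breakdown = {}
--     total_deduction = 0
--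
--     for category, cat_findings in categories.items():
--         if not cat_findings:
--             continue
--
--         # Calculate points for this category
--         category_points = sum(
--             SEVERITY_POINTS.get(f.get('severity', 'LOW'), -1)
--             for f in cat_findings
--         )
--         total_deduction += category_points
--
--         # Find highest severity in this category
--         severity_order = ['CRITICAL', 'HIGH', 'MEDIUM', 'LOW']
--         highest_severity = 'LOW'
--         for sev in severity_order:
--             if any(f.get('severity') == sev for f in cat_findings):
--                 highest_severity = sev
--                 break
--
--         breakdown[category] = {
--             'points': category_points,
--             'count': len(cat_findings),
--             'severity': highest_severity
--         }
--
--     # Calculate final score (0-100)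
--     score = max(0, min(100, 100 + total_deduction))
--
--     return score, breakdown
-- ===== SOURCE B (Python) =====
-- def calculate_security_score(findings):
--     ORDER = ['CRITICAL', 'HIGH', 'MEDIUM', 'LOW']
--     POINTS = {'CRITICAL': -20, 'HIGH': -10, 'MEDIUM': -5}
--     acc = {cat: (0, 0, 3) for cat in ('EC2', 'S3', 'IAM')}
--     for f in findings:
--         check = f.get('check', '')
--         for cat in ('EC2', 'S3', 'IAM'):
--             if check.startswith(cat + '_'):
--                 pts, cnt, rank = acc[cat]
--                 sev = f.get('severity')
--                 if sev in ORDER: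
--                     rank = min(rank, ORDER.index(sev))
--                 acc[cat] = (pts + POINTS.get(sev, -1), cnt + 1, rank)
--                 break
--     breakdown = {}
--     total = 0
--     for cat in ('EC2', 'S3', 'IAM'):
--         pts, cnt, rank = acc[cat]
--         if cnt:
--             total += pts
--             breakdown[cat] = {'points': pts, 'count': cnt, 'severity': ORDER[rank]}
--     return max(0, min(100, 100 + total)), breakdown
-- ===== Notes on version B (the rewrite author's own statement) =====
-- stated objective: alternative
-- what changed: Replaces A's group-into-lists-then-rescan design (build per-category finding lists, then per category a sum pass, a len, and a severity-order search loop) with a single pass that keeps only three numeric accumulators (points, count, best-severity rank) per category.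
import Mathlib
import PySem

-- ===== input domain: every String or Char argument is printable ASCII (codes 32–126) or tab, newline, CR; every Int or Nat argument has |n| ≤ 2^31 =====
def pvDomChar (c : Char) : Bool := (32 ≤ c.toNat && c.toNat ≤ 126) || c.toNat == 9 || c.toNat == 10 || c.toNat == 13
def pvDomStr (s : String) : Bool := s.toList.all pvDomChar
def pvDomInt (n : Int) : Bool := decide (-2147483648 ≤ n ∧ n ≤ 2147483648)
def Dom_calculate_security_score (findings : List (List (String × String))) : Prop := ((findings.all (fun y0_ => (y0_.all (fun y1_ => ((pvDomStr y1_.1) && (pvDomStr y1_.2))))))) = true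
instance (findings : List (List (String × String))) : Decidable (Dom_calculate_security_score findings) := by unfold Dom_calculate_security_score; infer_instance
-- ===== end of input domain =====

-- B replaces A's group-into-lists-then-rescan design with a single pass keeping only numeric
-- accumulators (points, count, best-severity rank) per category; same result, O(1) extra storage.


-- ===== PORT A =====
-- a finding is a dict str->str: f.get(k, d) / f.get(k)
def pvFGetD (f : List (String × String)) (k d : String) : String := (PySem.Dict.mk f).getD k d
def pvFGet? (f : List (String × String)) (k : String) : Option String := (PySem.Dict.mk f).get? k

def pvSEVERITY_POINTS : PySem.Dict String Int :=
  PySem.Dict.mk [("CRITICAL", -20), ("HIGH", -10), ("MEDIUM", -5), ("LOW", -1)]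

-- the 'categories' dict has the three statically-known keys EC2/S3/IAM; ported as a triple of lists
def pvClassStep (acc : List (List (String × String)) × List (List (String × String)) × List (List (String × String)))
    (f : List (String × String)) :
    List (List (String × String)) × List (List (String × String)) × List (List (String × String)) :=
  let check := pvFGetD f "check" ""
  if PySem.Str.startswith check "EC2_" then (acc.1 ++ [f], acc.2.1, acc.2.2)
  else if PySem.Str.startswith check "S3_" then (acc.1, acc.2.1 ++ [f], acc.2.2)
  else if PySem.Str.startswith check "IAM_" then (acc.1, acc.2.1, acc.2.2 ++ [f])
  else acc

def pvCatPoints (l : List (List (String × String))) : Int :=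
  (l.map (fun f => pvSEVERITY_POINTS.getD (pvFGetD f "severity" "LOW") (-1))).sum

-- the severity_order loop with break = first sev for which some finding matches, else 'LOW'
def pvHighest (l : List (List (String × String))) : String :=
  match ["CRITICAL", "HIGH", "MEDIUM", "LOW"].find?
      (fun sev => l.any (fun f => pvFGet? f "severity" == some sev)) with
  | some s => s
  | none => "LOW"

-- the breakdown loop body over categories.items()
def pvBreakStep (st : List (String × List (String × String)) × Int)
    (p : String × List (List (String × String))) :
    List (String × List (String × String)) × Int :=
  if p.2 = [] then st
  else
    let pts := pvCatPoints p.2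
    (st.1 ++ [(p.1, [("points", PySem.Int.toStr pts), ("count", PySem.Int.toStr (p.2.length : Int)),
                     ("severity", pvHighest p.2)])],
     st.2 + pts)

def calculate_security_score (findings : List (List (String × String))) : Int × (List (String × List (String × String))) :=
  let cats := findings.foldl pvClassStep ([], [], [])
  let res := [("EC2", cats.1), ("S3", cats.2.1), ("IAM", cats.2.2)].foldl pvBreakStep ([], 0)
  (max 0 (min 100 (100 + res.2)), res.1)

-- ===== PORT B =====
def pvORDER : List String := ["CRITICAL", "HIGH", "MEDIUM", "LOW"]
def pvPOINTS : PySem.Dict String Int := PySem.Dict.mk [("CRITICAL", -20), ("HIGH", -10), ("MEDIUM", -5)]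

-- acc[cat] update: (pts + POINTS.get(sev,-1), cnt + 1, min rank ORDER.index(sev) when sev in ORDER)
def pvUpd (t : Int × Int × Nat) (f : List (String × String)) : Int × Int × Nat :=
  let sev := pvFGet? f "severity"
  let p : Int := match sev with
    | some s => pvPOINTS.getD s (-1)
    | none => -1
  let rank := match sev with
    | some s => match pvORDER.idxOf? s with
      | some i => min t.2.2 i
      | none => t.2.2
    | none => t.2.2
  (t.1 + p, t.2.1 + 1, rank)

-- the inner 'for cat … if startswith … break' loop, unrolled over the fixed 3-tuple
def pvBStep (st : (Int × Int × Nat) × (Int × Int × Nat) × (Int × Int × Nat))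
    (f : List (String × String)) :
    (Int × Int × Nat) × (Int × Int × Nat) × (Int × Int × Nat) :=
  let check := pvFGetD f "check" ""
  if PySem.Str.startswith check "EC2_" then (pvUpd st.1 f, st.2.1, st.2.2)
  else if PySem.Str.startswith check "S3_" then (st.1, pvUpd st.2.1 f, st.2.2)
  else if PySem.Str.startswith check "IAM_" then (st.1, st.2.1, pvUpd st.2.2 f)
  else st

def pvEmit (st : List (String × List (String × String)) × Int)
    (p : String × (Int × Int × Nat)) :
    List (String × List (String × String)) × Int :=
  if p.2.2.1 = 0 then st
  else
    (st.1 ++ [(p.1, [("points", PySem.Int.toStr p.2.1), ("count", PySem.Int.toStr p.2.2.1),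
                     ("severity", pvORDER.getD p.2.2.2 "LOW")])],
     st.2 + p.2.1)

def calculate_security_score_alt (findings : List (List (String × String))) : Int × (List (String × List (String × String))) :=
  let acc := findings.foldl pvBStep ((0, 0, 3), (0, 0, 3), (0, 0, 3))
  let res := [("EC2", acc.1), ("S3", acc.2.1), ("IAM", acc.2.2)].foldl pvEmit ([], 0)
  (max 0 (min 100 (100 + res.2)), res.1)

-- ===== PRECONDITION & SPEC =====
def Spec_calculate_security_score (findings : List (List (String × String))) (out : Int × (List (String × List (String × String)))) : Prop := out = calculate_security_score_alt findings
instance (findings : List (List (String × String))) (out : Int × (List (String × List (String × String)))) : Decidable (Spec_calculate_security_score findings out) := by unfold Spec_calculate_security_score; infer_instance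

-- ===== CLAIM (what is proved, stated in full; the proofs are below) =====
def Claim_equal_calculate_security_score : Prop := ∀ (findings : List (List (String × String))), Dom_calculate_security_score findings → Spec_calculate_security_score findings (calculate_security_score findings)


-- ===== LEMMAS AND PROOFS =====
-- A-side per-finding deduction
def pvPtA (f : List (String × String)) : Int :=
  pvSEVERITY_POINTS.getD (pvFGetD f "severity" "LOW") (-1)

-- B's rank update step, and the running minimum over a list
def pvStepR (r : Nat) (f : List (String × String)) : Nat :=
  match pvFGet? f "severity" with
  | some s => match pvORDER.idxOf? s with
    | some i => min r i
    | none => r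
  | none => r

def pvM (l : List (List (String × String))) (r : Nat) : Nat := l.foldl pvStepR r

-- the three classification predicates (first matching prefix wins)
def pvIsE (f : List (String × String)) : Bool := PySem.Str.startswith (pvFGetD f "check" "") "EC2_"
def pvIsS (f : List (String × String)) : Bool :=
  !pvIsE f && PySem.Str.startswith (pvFGetD f "check" "") "S3_"
def pvIsI (f : List (String × String)) : Bool :=
  !pvIsE f && !pvIsS f && PySem.Str.startswith (pvFGetD f "check" "") "IAM_"

theorem pvIdxOf_char (s : String) (i : Nat) :
    pvORDER.idxOf? s = some i ↔
      ((s = "CRITICAL" ∧ i = 0) ∨ (s = "HIGH" ∧ i = 1) ∨ (s = "MEDIUM" ∧ i = 2) ∨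
       (s = "LOW" ∧ i = 3)) := by
  by_cases h1 : s = "CRITICAL"
  · subst h1; simp [show pvORDER.idxOf? "CRITICAL" = some 0 from by decide, eq_comm]
  by_cases h2 : s = "HIGH"
  · subst h2; simp [show pvORDER.idxOf? "HIGH" = some 1 from by decide, eq_comm]
  by_cases h3 : s = "MEDIUM"
  · subst h3; simp [show pvORDER.idxOf? "MEDIUM" = some 2 from by decide, eq_comm]
  by_cases h4 : s = "LOW"
  · subst h4; simp [show pvORDER.idxOf? "LOW" = some 3 from by decide, eq_comm]
  · have hn : pvORDER.idxOf? s = none := by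
      simp [pvORDER, List.idxOf?_eq_none_iff, h1, h2, h3, h4]
    simp [hn, h1, h2, h3, h4]

theorem pvPt_eq (f : List (String × String)) :
    (match pvFGet? f "severity" with
      | some s => pvPOINTS.getD s (-1)
      | none => (-1 : Int)) = pvPtA f := by
  have key : ∀ s : String, pvPOINTS.getD s (-1) = pvSEVERITY_POINTS.getD s (-1) := by
    intro s
    simp only [pvPOINTS, pvSEVERITY_POINTS, PySem.Dict.getD_eq_get?_getD,
      PySem.Dict.get?_mk_cons]
    split_ifs <;> rfl
  unfold pvPtA pvFGetD pvFGet?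
  rw [PySem.Dict.getD_eq_get?_getD (d := PySem.Dict.mk f)]
  cases (PySem.Dict.mk f).get? "severity" with
  | none => simp only [Option.getD_none]; decide
  | some s => simp only [Option.getD_some]; exact key s

theorem pvUpd_eq (t : Int × Int × Nat) (f : List (String × String)) :
    pvUpd t f = (t.1 + pvPtA f, t.2.1 + 1, pvStepR t.2.2 f) := by
  have hpt := pvPt_eq f
  cases hs : pvFGet? f "severity" with
  | none =>
    rw [hs] at hpt
    simp only [pvUpd, pvStepR, hs, ← hpt]
  | some s =>
    rw [hs] at hpt
    simp only [pvUpd, pvStepR, hs, ← hpt]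

theorem pvClass_foldl (l : List (List (String × String)))
    (a b c : List (List (String × String))) :
    l.foldl pvClassStep (a, b, c) =
      (a ++ l.filter pvIsE, b ++ l.filter pvIsS, c ++ l.filter pvIsI) := by
  induction l generalizing a b c with
  | nil => simp
  | cons f l ih =>
    simp only [List.foldl_cons, List.filter_cons]
    cases h1 : PySem.Str.startswith (pvFGetD f "check" "") "EC2_" <;>
      cases h2 : PySem.Str.startswith (pvFGetD f "check" "") "S3_" <;>
      cases h3 : PySem.Str.startswith (pvFGetD f "check" "") "IAM_" <;>
      [skip; skip; skip; skip; skip; skip; skip; skip] <;>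
      (simp [PySem.Str.startswith_eq] at h1 h2 h3
       simp [pvClassStep, pvIsE, pvIsS, pvIsI, h1, h2, h3, ih])

theorem pvBStep_foldl (l : List (List (String × String))) (t₁ t₂ t₃ : Int × Int × Nat) :
    l.foldl pvBStep (t₁, t₂, t₃) =
      ((l.filter pvIsE).foldl pvUpd t₁, (l.filter pvIsS).foldl pvUpd t₂,
       (l.filter pvIsI).foldl pvUpd t₃) := by
  induction l generalizing t₁ t₂ t₃ with
  | nil => simp
  | cons f l ih =>
    simp only [List.foldl_cons, List.filter_cons]
    cases h1 : PySem.Str.startswith (pvFGetD f "check" "") "EC2_" <;>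
      cases h2 : PySem.Str.startswith (pvFGetD f "check" "") "S3_" <;>
      cases h3 : PySem.Str.startswith (pvFGetD f "check" "") "IAM_" <;>
      [skip; skip; skip; skip; skip; skip; skip; skip] <;>
      (simp [PySem.Str.startswith_eq] at h1 h2 h3
       simp [pvBStep, pvIsE, pvIsS, pvIsI, h1, h2, h3, ih])

theorem pvUpd_foldl (l : List (List (String × String))) (p c : Int) (r : Nat) :
    l.foldl pvUpd (p, c, r) = (p + pvCatPoints l, c + (l.length : Int), pvM l r) := by
  induction l generalizing p c r with
  | nil => simp [pvCatPoints, pvM]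
  | cons f l ih =>
    simp only [List.foldl_cons, pvUpd_eq, ih, pvM, pvCatPoints, List.map_cons, List.sum_cons,
      List.length_cons]
    refine Prod.ext ?_ (Prod.ext ?_ rfl) <;> simp [pvPtA] <;> ring

theorem pvStepR_le (r : Nat) (f : List (String × String)) : pvStepR r f ≤ r := by
  cases hs : pvFGet? f "severity" with
  | none => simp [pvStepR, hs]
  | some s =>
    cases hi : pvORDER.idxOf? s with
    | none => simp [pvStepR, hs, hi]
    | some i => simp [pvStepR, hs, hi]

theorem pvM_le_self (l : List (List (String × String))) (r : Nat) : pvM l r ≤ r := by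
  induction l generalizing r with
  | nil => exact le_refl r
  | cons f l ih => exact le_trans (ih (pvStepR r f)) (pvStepR_le r f)

theorem pvM_le_iff (l : List (List (String × String))) (r k : Nat) :
    pvM l r ≤ k ↔
      r ≤ k ∨ ∃ f ∈ l, ∃ s, pvFGet? f "severity" = some s ∧
        ∃ i, pvORDER.idxOf? s = some i ∧ i ≤ k := by
  induction l generalizing r with
  | nil => simp [pvM]
  | cons f l ih =>
    have hM : pvM (f :: l) r = pvM l (pvStepR r f) := rfl
    rw [hM, ih]
    cases hs : pvFGet? f "severity" with
    | none =>
      simp only [pvStepR, hs]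
      constructor
      · rintro (h | h)
        · exact Or.inl h
        · obtain ⟨g, hg, rest⟩ := h; exact Or.inr ⟨g, List.mem_cons_of_mem f hg, rest⟩
      · rintro (h | ⟨g, hg, s, hget, rest⟩)
        · exact Or.inl h
        · rcases List.mem_cons.mp hg with rfl | hg'
          · rw [hs] at hget; cases hget
          · exact Or.inr ⟨g, hg', s, hget, rest⟩
    | some s =>
      cases hi : pvORDER.idxOf? s with
      | none =>
        simp only [pvStepR, hs, hi]
        constructor
        · rintro (h | h)
          · exact Or.inl h
          · obtain ⟨g, hg, rest⟩ := h; exact Or.inr ⟨g, List.mem_cons_of_mem f hg, rest⟩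
        · rintro (h | ⟨g, hg, s', hget, i, hidx, hik⟩)
          · exact Or.inl h
          · rcases List.mem_cons.mp hg with rfl | hg'
            · rw [hs] at hget; cases hget; rw [hi] at hidx; cases hidx
            · exact Or.inr ⟨g, hg', s', hget, i, hidx, hik⟩
      | some j =>
        simp only [pvStepR, hs, hi, min_le_iff]
        constructor
        · rintro ((h | h) | h)
          · exact Or.inl h
          · exact Or.inr ⟨f, List.mem_cons_self, s, hs, j, hi, h⟩
          · obtain ⟨g, hg, rest⟩ := h; exact Or.inr ⟨g, List.mem_cons_of_mem f hg, rest⟩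
        · rintro (h | ⟨g, hg, s', hget, i, hidx, hik⟩)
          · exact Or.inl (Or.inl h)
          · rcases List.mem_cons.mp hg with rfl | hg'
            · rw [hs] at hget; cases hget; rw [hi] at hidx; cases hidx
              exact Or.inl (Or.inr hik)
            · exact Or.inr ⟨g, hg', s', hget, i, hidx, hik⟩

theorem pvAny_iff (l : List (List (String × String))) (k : Nat) (hk : k < 3) :
    pvM l 3 ≤ k ↔ ∃ f ∈ l, ∃ s, pvFGet? f "severity" = some s ∧
      ∃ i, pvORDER.idxOf? s = some i ∧ i ≤ k := by
  rw [pvM_le_iff]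
  constructor
  · rintro (h | h)
    · omega
    · exact h
  · exact Or.inr

theorem pvHighest_eq (l : List (List (String × String))) :
    pvHighest l = pvORDER.getD (pvM l 3) "LOW" := by
  have hb : pvM l 3 ≤ 3 := pvM_le_self l 3
  have h0 : (l.any (fun f => pvFGet? f "severity" == some "CRITICAL") = true) ↔ pvM l 3 ≤ 0 := by
    rw [pvAny_iff l 0 (by omega)]
    simp [List.any_eq_true, pvIdxOf_char]
  have h1 : (l.any (fun f => pvFGet? f "severity" == some "CRITICAL") = true ∨
      l.any (fun f => pvFGet? f "severity" == some "HIGH") = true) ↔ pvM l 3 ≤ 1 := by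
    rw [pvAny_iff l 1 (by omega)]
    constructor
    · rintro (h | h) <;> simp only [List.any_eq_true, beq_iff_eq] at h <;>
        obtain ⟨f, hf, hs⟩ := h
      · exact ⟨f, hf, _, hs, 0, by rw [pvIdxOf_char]; tauto, by omega⟩
      · exact ⟨f, hf, _, hs, 1, by rw [pvIdxOf_char]; tauto, by omega⟩
    · rintro ⟨f, hf, s, hs, i, hidx, hik⟩
      rw [pvIdxOf_char] at hidx
      rcases hidx with ⟨rfl, rfl⟩ | ⟨rfl, rfl⟩ | ⟨rfl, rfl⟩ | ⟨rfl, rfl⟩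
      · exact Or.inl (by simp only [List.any_eq_true, beq_iff_eq]; exact ⟨f, hf, hs⟩)
      · exact Or.inr (by simp only [List.any_eq_true, beq_iff_eq]; exact ⟨f, hf, hs⟩)
      · omega
      · omega
  have h2 : (l.any (fun f => pvFGet? f "severity" == some "CRITICAL") = true ∨
      l.any (fun f => pvFGet? f "severity" == some "HIGH") = true ∨
      l.any (fun f => pvFGet? f "severity" == some "MEDIUM") = true) ↔ pvM l 3 ≤ 2 := by
    rw [pvAny_iff l 2 (by omega)]
    constructor
    · rintro (h | h | h) <;> simp only [List.any_eq_true, beq_iff_eq] at h <;>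
        obtain ⟨f, hf, hs⟩ := h
      · exact ⟨f, hf, _, hs, 0, by rw [pvIdxOf_char]; tauto, by omega⟩
      · exact ⟨f, hf, _, hs, 1, by rw [pvIdxOf_char]; tauto, by omega⟩
      · exact ⟨f, hf, _, hs, 2, by rw [pvIdxOf_char]; tauto, by omega⟩
    · rintro ⟨f, hf, s, hs, i, hidx, hik⟩
      rw [pvIdxOf_char] at hidx
      rcases hidx with ⟨rfl, rfl⟩ | ⟨rfl, rfl⟩ | ⟨rfl, rfl⟩ | ⟨rfl, rfl⟩
      · exact Or.inl (by simp only [List.any_eq_true, beq_iff_eq]; exact ⟨f, hf, hs⟩)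
      · exact Or.inr (Or.inl (by simp only [List.any_eq_true, beq_iff_eq]; exact ⟨f, hf, hs⟩))
      · exact Or.inr (Or.inr (by simp only [List.any_eq_true, beq_iff_eq]; exact ⟨f, hf, hs⟩))
      · omega
  unfold pvHighest
  interval_cases hm : (pvM l 3)
  · have aC : l.any (fun f => pvFGet? f "severity" == some "CRITICAL") = true := h0.mpr (by omega)
    simp [List.find?, aC, pvORDER]
  · have aC : l.any (fun f => pvFGet? f "severity" == some "CRITICAL") = false := by
      rw [Bool.eq_false_iff]; intro h; have := h0.mp h; omega
    have aH : l.any (fun f => pvFGet? f "severity" == some "HIGH") = true := by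
      rcases h1.mpr (by omega) with h | h
      · rw [aC] at h; cases h
      · exact h
    simp [List.find?, aC, aH, pvORDER]
  · have aC : l.any (fun f => pvFGet? f "severity" == some "CRITICAL") = false := by
      rw [Bool.eq_false_iff]; intro h; have := h0.mp h; omega
    have aH : l.any (fun f => pvFGet? f "severity" == some "HIGH") = false := by
      rw [Bool.eq_false_iff]; intro h; have := h1.mp (Or.inr h); omega
    have aM : l.any (fun f => pvFGet? f "severity" == some "MEDIUM") = true := by
      rcases h2.mpr (by omega) with h | h | h
      · rw [aC] at h; cases h
      · rw [aH] at h; cases h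
      · exact h
    simp [List.find?, aC, aH, aM, pvORDER]
  · have aC : l.any (fun f => pvFGet? f "severity" == some "CRITICAL") = false := by
      rw [Bool.eq_false_iff]; intro h; have := h0.mp h; omega
    have aH : l.any (fun f => pvFGet? f "severity" == some "HIGH") = false := by
      rw [Bool.eq_false_iff]; intro h; have := h1.mp (Or.inr h); omega
    have aM : l.any (fun f => pvFGet? f "severity" == some "MEDIUM") = false := by
      rw [Bool.eq_false_iff]; intro h; have := h2.mp (Or.inr (Or.inr h)); omega
    cases aL : l.any (fun f => pvFGet? f "severity" == some "LOW") <;>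
      simp [List.find?, aC, aH, aM, aL, pvORDER]

theorem pvBreak_emit (st : List (String × List (String × String)) × Int) (cat : String)
    (l : List (List (String × String))) :
    pvBreakStep st (cat, l) =
      pvEmit st (cat, (pvCatPoints l, ((l.length : Int), pvM l 3))) := by
  cases l with
  | nil => rfl
  | cons f l =>
    unfold pvBreakStep pvEmit
    have hne : (f :: l : List (List (String × String))) ≠ [] := by simp
    have hlen : ((f :: l).length : Int) ≠ 0 := by simp; omega
    simp only [hne, hlen, if_false]
    rw [pvHighest_eq]

-- ===== VERDICT (by name: the statement is the Claim_ definition above) =====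
theorem calculate_security_score_spec : Claim_equal_calculate_security_score := by
  intro findings _
  unfold Spec_calculate_security_score calculate_security_score calculate_security_score_alt
  rw [pvClass_foldl, pvBStep_foldl]
  simp only [List.nil_append, List.foldl_cons, List.foldl_nil, pvUpd_foldl, zero_add,
    pvBreak_emit]
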